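-- pv_equiv track=rewrite | github.com/janmichael88/Leetcode_Monthly_Challenges | Dec_22.py | restoreString
-- ===== SOURCE A (Python) =====
-- from typing import List
--
-- def restoreString(s: str, indices: List[int]) -> str:
--     '''
--     just swap in place
--     '''
--     s = list(s)
--     N = len(indices)
--
--     ans = [0]*N
--
--     for i in range(N):
--         swap_idx = indices[i]
--         ans[swap_idx] = s[i]
--
--     return "".join(ans)
-- ===== SOURCE B (Python) =====
-- def restoreString(s, indices):
--     # gather: for each output position, find which input position maps to it
--     return "".join(s[indices.index(j)] for j in range(len(indices)))
-- ===== Notes on version B (the rewrite author's own statement) =====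
-- stated objective: simpler
-- what changed: A scatters: one pass writing each character into a preallocated [0]*N buffer at its target index; B gathers: it emits output positions 0..N-1 in order, looking up the source position of each with indices.index(j). Pre_ excludes inputs where A raises (s shorter than indices, an index outside [-N,N), an uncovered position) and inputs containing a negative index, where A silently wraps around while B's positional lookup raises ValueError.
-- outside the precondition, e.g. on restoreString('ab', [-1, 0]): A returns 'ba', B raises ValueError
import Mathlib
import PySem

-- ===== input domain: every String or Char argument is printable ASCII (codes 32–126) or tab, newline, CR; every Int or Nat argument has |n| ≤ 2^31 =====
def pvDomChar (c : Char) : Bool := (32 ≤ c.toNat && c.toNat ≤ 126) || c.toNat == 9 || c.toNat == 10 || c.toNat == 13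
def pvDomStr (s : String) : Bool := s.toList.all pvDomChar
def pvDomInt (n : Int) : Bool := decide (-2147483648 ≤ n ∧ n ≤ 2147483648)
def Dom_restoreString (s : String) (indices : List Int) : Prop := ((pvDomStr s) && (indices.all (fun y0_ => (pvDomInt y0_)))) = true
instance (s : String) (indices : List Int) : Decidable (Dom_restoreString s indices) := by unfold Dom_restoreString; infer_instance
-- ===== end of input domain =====

-- B replaces A's scatter into a preallocated buffer with an in-order gather via indices.index(j):
-- a simpler one-line decomposition (quadratic, not claimed faster). Pre_ excludes inputs where A
-- raises and inputs with negative indices (A wraps around there; B's .index lookup raises).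


-- ===== PORT A =====
-- ans is a list of Option Char: 'none' is the Python integer 0 placeholder of [0]*N
-- (under Pre_ every slot is written, so ''.join never sees a 0); a failing s[i] / ans[swap_idx]
-- access (Python IndexError, outside Pre_) leaves the state unchanged.
def restoreString (s : String) (indices : List Int) : String :=
  let sl := s.toList
  let N := indices.length
  let ans : List (Option Char) :=
    (List.range N).foldl (fun (ans : List (Option Char)) (i : Nat) =>
      match sl[i]? with
      | some c => PySem.List.pySetD ans (PySem.List.pyGetD indices ((i : Int)) 0) (some c)
      | none => ans) (List.replicate N (none : Option Char))
  String.ofList (ans.filterMap id)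

-- ===== PORT B =====
-- ''.join(s[indices.index(j)] for j in range(N)); a failing indices.index(j) (ValueError) or
-- s[...] (IndexError) — both outside Pre_ — is skipped.
def restoreString_alt (s : String) (indices : List Int) : String :=
  String.ofList ((List.range indices.length).filterMap (fun (j : Nat) =>
    match PySem.List.index? indices ((j : Int)) with
    | some i => PySem.Str.pyGet? s ((i : Int))
    | none => none))

-- ===== PRECONDITION & SPEC =====
-- Pre_ excludes inputs where A raises (s shorter than indices: IndexError; an index outside
-- [-N,N): IndexError; an uncovered position: ''.join meets the integer 0, TypeError) and inputs
-- with a negative index, where A silently wraps around while B's indices.index(j) raises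
-- ValueError (B returns nowhere A's wrap-around value would have to be matched).
def Pre_restoreString (s : String) (indices : List Int) : Prop :=
  indices.length ≤ s.toList.length ∧
  ∀ j < indices.length, (j : Int) ∈ indices
instance (s : String) (indices : List Int) : Decidable (Pre_restoreString s indices) := by
  unfold Pre_restoreString; infer_instance

def pvWitness_restoreString : String × List Int := ("abc", [1, 0, 2])

def Spec_restoreString (s : String) (indices : List Int) (out : String) : Prop := out = restoreString_alt s indices
instance (s : String) (indices : List Int) (out : String) : Decidable (Spec_restoreString s indices out) := by unfold Spec_restoreString; infer_instance

-- ===== CLAIM (what is proved, stated in full; the proofs are below) =====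
def Claim_equal_restoreString : Prop := ∀ (s : String) (indices : List Int), Dom_restoreString s indices → Pre_restoreString s indices → Spec_restoreString s indices (restoreString s indices)

-- ===== LEMMAS AND PROOFS =====

-- Pre_ forces indices to be a permutation of 0..N-1.
def pvRangeInt (n : Nat) : List Int := (List.range n).map Int.ofNat

lemma pv_rangeInt_nodup (n : Nat) : (pvRangeInt n).Nodup :=
  (List.nodup_range).map (fun a b h => by simpa [Int.ofNat_inj] using h)

lemma pv_perm (indices : List Int) (hcov : ∀ j < indices.length, (j : Int) ∈ indices) :
    indices.Perm (pvRangeInt indices.length) := by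
  have hsub : pvRangeInt indices.length ⊆ indices := by
    intro x hx
    obtain ⟨j, hj, rfl⟩ := List.mem_map.mp hx
    exact hcov j (List.mem_range.mp hj)
  have hsp : (pvRangeInt indices.length).Subperm indices :=
    List.subperm_of_subset (pv_rangeInt_nodup _) hsub
  exact (hsp.perm_of_length_le (by simp [pvRangeInt])).symm

lemma pv_nodup (indices : List Int) (hcov : ∀ j < indices.length, (j : Int) ∈ indices) :
    indices.Nodup :=
  (pv_perm indices hcov).nodup_iff.mpr (pv_rangeInt_nodup _)

lemma pv_bounds (indices : List Int) (hcov : ∀ j < indices.length, (j : Int) ∈ indices)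
    (x : Int) (hx : x ∈ indices) : 0 ≤ x ∧ x < (indices.length : Int) := by
  have := (pv_perm indices hcov).mem_iff.mp hx
  obtain ⟨j, hj, rfl⟩ := List.mem_map.mp this
  have := List.mem_range.mp hj
  simp only [Int.ofNat_eq_natCast]
  omega

-- first occurrence in a Nodup list is the occurrence
lemma pv_index?_nodup (l : List Int) (hnd : l.Nodup) (k : Nat) (hk : k < l.length) :
    PySem.List.index? l l[k] = some k := by
  rw [PySem.List.index?_eq_some_iff]
  refine ⟨l.take k, l.drop (k + 1), ?_, List.length_take_of_le (le_of_lt hk), ?_⟩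
  · conv_lhs => rw [← List.take_append_drop k l]
    rw [List.drop_eq_getElem_cons hk]
  · intro hmem
    obtain ⟨i, hi, hgi⟩ := List.getElem_of_mem hmem
    rw [List.length_take_of_le (le_of_lt hk)] at hi
    rw [List.getElem_take] at hgi
    exact absurd (List.Nodup.getElem_inj_iff hnd |>.mp hgi) (by omega)

-- list read as a map over positions
lemma pv_list_eq_map_range {α : Type} (d : α) (l : List α) :
    l = (List.range l.length).map (fun j => l.getD j d) := by
  apply List.ext_getElem
  · simp
  · intro i h1 h2
    simp [List.getD_eq_getElem?_getD, List.getElem?_eq_getElem h1]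

-- loop invariant for A's scatter: after k writes, slot j holds s[i] exactly when the (unique)
-- source position i of j has already been processed (i < k)
lemma pv_inv (sl : List Char) (indices : List Int) (hlen : indices.length ≤ sl.length)
    (hcov : ∀ j < indices.length, (j : Int) ∈ indices)
    (k : Nat) (hk : k ≤ indices.length) :
    (((List.range k).foldl (fun (ans : List (Option Char)) (i : Nat) =>
        match sl[i]? with
        | some c => PySem.List.pySetD ans (PySem.List.pyGetD indices ((i : Int)) 0) (some c)
        | none => ans) (List.replicate indices.length (none : Option Char))).length = indices.length)
    ∧ ∀ j : Nat, j < indices.length →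
      ((List.range k).foldl (fun (ans : List (Option Char)) (i : Nat) =>
        match sl[i]? with
        | some c => PySem.List.pySetD ans (PySem.List.pyGetD indices ((i : Int)) 0) (some c)
        | none => ans) (List.replicate indices.length (none : Option Char))).getD j none
      = (match PySem.List.index? indices ((j : Int)) with
         | some i => if i < k then sl[i]? else none
         | none => none) := by
  have hnd := pv_nodup indices hcov
  induction k with
  | zero =>
    refine ⟨by simp, fun j hj => ?_⟩
    simp only [List.range_zero, List.foldl_nil]
    rw [List.getD_eq_getElem?_getD]
    cases PySem.List.index? indices ((j : Int)) <;> simp [hj]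
  | succ k ih =>
    obtain ⟨ihlen, ihp⟩ := ih (Nat.le_of_succ_le hk)
    have hkN : k < indices.length := hk
    have hksl : k < sl.length := lt_of_lt_of_le hkN hlen
    set x := indices[k]'hkN with hxdef
    obtain ⟨hx0, hxN⟩ := pv_bounds indices hcov x (List.getElem_mem hkN)
    have hget : PySem.List.pyGetD indices (k : Int) 0 = x := by
      rw [PySem.List.pyGetD_natCast]
      simp [hxdef, List.getD_eq_getElem?_getD, List.getElem?_eq_getElem hkN]
    have hxg : indices[k]'hkN = x := hxdef.symm
    clear_value x
    rw [List.range_succ, List.foldl_append, List.foldl_cons, List.foldl_nil]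
    simp only [List.getElem?_eq_getElem hksl, hget]
    set A := (List.range k).foldl (fun (ans : List (Option Char)) (i : Nat) =>
        match sl[i]? with
        | some c => PySem.List.pySetD ans (PySem.List.pyGetD indices ((i : Int)) 0) (some c)
        | none => ans) (List.replicate indices.length (none : Option Char)) with hA
    have hset : PySem.List.pySetD A x (some sl[k]) = A.set x.toNat (some sl[k]) :=
      PySem.List.pySetD_of_nonneg A (some sl[k]) hx0
    refine ⟨by rw [hset]; simp [ihlen], fun j hj => ?_⟩
    rw [hset]
    by_cases hjx : (j : Int) = x
    · have hjk : j = x.toNat := by omega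
      have hidx : PySem.List.index? indices ((j : Int)) = some k := by
        rw [hjx, ← hxg]; exact pv_index?_nodup indices hnd k hkN
      rw [hidx, List.getD_eq_getElem?_getD, ← hjk,
        List.getElem?_set_self (by omega)]
      simp
    · have hne : j ≠ x.toNat := by omega
      rw [List.getD_eq_getElem?_getD, List.getElem?_set_ne (by omega),
        ← List.getD_eq_getElem?_getD, ihp j hj]
      cases hidx : PySem.List.index? indices ((j : Int)) with
      | none => rfl
      | some i =>
        have hik : i ≠ k := by
          intro h
          obtain ⟨hilen, hgi, -⟩ := PySem.List.getElem_of_index?_eq_some hidx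
          subst h
          exact hjx (by rw [← hgi, hxg])
        simp only [Nat.lt_succ_iff_lt_or_eq, hik, or_false]

-- ===== VERDICT (by name: the statement is the Claim_ definition above) =====
theorem restoreString_spec : Claim_equal_restoreString := by
  intro s indices _hdom hpre
  obtain ⟨hlen, hcov⟩ := hpre
  unfold Spec_restoreString restoreString restoreString_alt
  obtain ⟨hAlen, hinv⟩ := pv_inv s.toList indices hlen hcov indices.length (le_refl _)
  set A := (List.range indices.length).foldl (fun (ans : List (Option Char)) (i : Nat) =>
      match s.toList[i]? with
      | some c => PySem.List.pySetD ans (PySem.List.pyGetD indices ((i : Int)) 0) (some c)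
      | none => ans) (List.replicate indices.length (none : Option Char)) with hA
  simp only []
  congr 1
  calc A.filterMap id
      = ((List.range A.length).map (fun j => A.getD j none)).filterMap id := by
        rw [← pv_list_eq_map_range]
    _ = (List.range indices.length).filterMap (fun j => A.getD j none) := by
        rw [hAlen, List.filterMap_map]; rfl
    _ = (List.range indices.length).filterMap (fun (j : Nat) =>
          match PySem.List.index? indices ((j : Int)) with
          | some i => PySem.Str.pyGet? s ((i : Int))
          | none => none) := by
        apply List.filterMap_congr
        intro j hj
        rw [hinv j (List.mem_range.mp hj)]
        cases hidx : PySem.List.index? indices ((j : Int)) with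
        | none => rfl
        | some i =>
          obtain ⟨hilen, -, -⟩ := PySem.List.getElem_of_index?_eq_some hidx
          simp [hilen]
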